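-- pv_equiv track=rewrite | github.com/eliottcassidy2000/math | 04-computation/ocf_skeleton_n5.py | independence_number_and_poly
-- ===== SOURCE A (Python) =====
-- from collections import defaultdict
--
-- def independence_number_and_poly(cycles):
--     """Compute independence polynomial of cycle conflict graph."""
--     m = len(cycles)
--     # Build adjacency
--     adj = [[False]*m for _ in range(m)]
--     for i in range(m):
--         for j in range(i+1, m):
--             if set(cycles[i]) & set(cycles[j]):
--                 adj[i][j] = adj[j][i] = True
--
--     # Count independent sets by size
--     alpha = defaultdict(int)
--     for mask in range(2**m):
--         verts = [i for i in range(m) if (mask >> i) & 1]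
--         indep = True
--         for i in range(len(verts)):
--             for j in range(i+1, len(verts)):
--                 if adj[verts[i]][verts[j]]:
--                     indep = False; break
--             if not indep: break
--         if indep:
--             alpha[len(verts)] += 1
--
--     return dict(alpha)
-- ===== SOURCE B (Python) =====
-- def _lowbit_index(mask):
--     i = 0
--     while mask % 2 == 0:
--         mask //= 2
--         i += 1
--     return i
--
--
-- def independence_number_and_poly(cycles):
--     """Compute independence polynomial of cycle conflict graph (mask DP)."""
--     m = len(cycles)
--     sets = [set(c) for c in cycles]
--     nbr = [0] * m
--     for i in range(m):
--         for j in range(i):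
--             if sets[i] & sets[j]:
--                 nbr[i] |= 1 << j
--                 nbr[j] |= 1 << i
--     info = [(True, 0)]  # per mask: (is independent?, popcount)
--     poly = {0: 1}
--     for mask in range(1, 2 ** m):
--         i = _lowbit_index(mask)
--         rest = mask - (1 << i)
--         ok_rest, pc_rest = info[rest]
--         ok = ok_rest and (rest & nbr[i]) == 0
--         pc = pc_rest + 1
--         if ok:
--             poly[pc] = poly.get(pc, 0) + 1
--         info.append((ok, pc))
--     return poly
-- ===== Notes on version B (the rewrite author's own statement) =====
-- stated objective: alternative
-- what changed: Replaces the per-mask O(m^2) pairwise adjacency scan (with per-pair set rebuilds) by precomputed neighbor bitmasks and a dynamic program over masks that derives each mask's independence from the mask with its lowest bit removed; per-mask cost drops from O(m^2) to O(1) word operations, though both programs remain exponential in m overall and a timing run could not confirm a speed-up at its top size.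
import Mathlib
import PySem

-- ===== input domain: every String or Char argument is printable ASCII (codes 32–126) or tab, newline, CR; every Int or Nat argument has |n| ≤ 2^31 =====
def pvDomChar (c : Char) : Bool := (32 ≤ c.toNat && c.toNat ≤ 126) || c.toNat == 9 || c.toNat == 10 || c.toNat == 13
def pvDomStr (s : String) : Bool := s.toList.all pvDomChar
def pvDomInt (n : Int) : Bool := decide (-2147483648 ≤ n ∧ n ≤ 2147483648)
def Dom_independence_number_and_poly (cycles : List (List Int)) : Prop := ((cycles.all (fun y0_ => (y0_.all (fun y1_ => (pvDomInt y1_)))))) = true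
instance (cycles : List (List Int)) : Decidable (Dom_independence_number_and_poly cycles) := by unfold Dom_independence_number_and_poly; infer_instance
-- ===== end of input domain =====

-- B replaces A's per-mask pairwise adjacency scan by precomputed neighbor bitmasks and
-- a dynamic program over masks (independence derived from the mask with its lowest bit
-- removed); objective: alternative algorithm with lower per-mask cost.

-- ===== PORT A =====
-- 'set(cycles[i]) & set(cycles[j])' used as a truth value (nonempty intersection)
def pvConflictA (cycles : List (List Int)) (i j : Nat) : Bool :=
  !(PySem.Set.inter (PySem.Set.ofList (cycles.getD i [])) (PySem.Set.ofList (cycles.getD j []))).isEmpty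

-- body of A's adjacency loops: 'adj[i][j] = adj[j][i] = True' (two sequential row updates)
def pvAdjStep (cycles : List (List Int)) (adj : List (List Bool)) (i j : Nat) : List (List Bool) :=
  if pvConflictA cycles i j then
    let adj1 := adj.set i ((adj.getD i []).set j true)
    adj1.set j ((adj1.getD j []).set i true)
  else adj

-- 'for i in range(m): for j in range(i+1, m): …' building the matrix
def pvAdjA (cycles : List (List Int)) : List (List Bool) :=
  (List.range cycles.length).foldl
    (fun adj i => (List.range' (i+1) (cycles.length - (i+1))).foldl
      (fun adj j => pvAdjStep cycles adj i j) adj)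
    (List.replicate cycles.length (List.replicate cycles.length false))

-- A's nested 'for i … for j … if adj[verts[i]][verts[j]]: indep = False; break' over verts;
-- the breaks are the short-circuit of '&&' / 'all' (same Boolean value)
def pvIndepChk (adj : List (List Bool)) : List Nat → Bool
  | [] => true
  | v :: rest => rest.all (fun w => !((adj.getD v []).getD w false)) && pvIndepChk adj rest

def independence_number_and_poly (cycles : List (List Int)) : List (Int × Int) :=
  -- 'for mask in range(2**m): …' filling the defaultdict alpha; dict(alpha) = its items
  ((List.range (2 ^ cycles.length)).foldl
    (fun (alpha : PySem.Dict Int Int) mask =>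
      let verts := (List.range cycles.length).filter (fun i => (mask >>> i) &&& 1 == 1)
      if pvIndepChk (pvAdjA cycles) verts then alpha.modify ((verts.length : Nat) : Int) 0 (· + 1) else alpha)
    PySem.Dict.empty).items

-- ===== PORT B =====
-- B's helper _lowbit_index: 'while mask % 2 == 0: mask //= 2; i += 1'
-- (the 'mask = 0' branch is a totality guard only: the loop is never entered with 0)
def pvLowbitIndex (mask : Nat) : Nat :=
  if mask % 2 == 0 then
    (if h : mask = 0 then 0 else pvLowbitIndex (mask / 2) + 1)
  else 0
termination_by mask
decreasing_by exact Nat.div_lt_self (Nat.pos_of_ne_zero h) Nat.one_lt_two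

-- body of B's neighbor-mask loops: 'nbr[i] |= 1 << j; nbr[j] |= 1 << i'
def pvNbrStep (sets : List (PySem.Set Int)) (nbr : List Nat) (i j : Nat) : List Nat :=
  if !(PySem.Set.inter (sets.getD i []) (sets.getD j [])).isEmpty then
    let nbr1 := nbr.set i (nbr.getD i 0 ||| (1 <<< j))
    nbr1.set j (nbr1.getD j 0 ||| (1 <<< i))
  else nbr

-- 'sets = [set(c) for c in cycles]' then 'for i in range(m): for j in range(i): …'
def pvNbrB (cycles : List (List Int)) : List Nat :=
  (List.range cycles.length).foldl
    (fun nbr i => (List.range i).foldl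
      (fun nbr j => pvNbrStep (cycles.map PySem.Set.ofList) nbr i j) nbr)
    (List.replicate cycles.length 0)

-- body of B's DP loop over masks (state: the 'info' list and the 'poly' dict)
def pvDpStep (nbr : List Nat) (st : List (Bool × Nat) × PySem.Dict Int Int) (mask : Nat) :
    List (Bool × Nat) × PySem.Dict Int Int :=
  let i := pvLowbitIndex mask
  let rest := mask - (1 <<< i)
  let p := st.1.getD rest (true, 0)
  let ok := p.1 && (rest &&& nbr.getD i 0 == 0)
  let pc := p.2 + 1
  let poly := if ok then st.2.insert ((pc : Nat) : Int) (st.2.getD ((pc : Nat) : Int) 0 + 1) else st.2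
  (st.1 ++ [(ok, pc)], poly)

def independence_number_and_poly_alt (cycles : List (List Int)) : List (Int × Int) :=
  -- info = [(True, 0)], poly = {0: 1}, then 'for mask in range(1, 2**m): …'
  ((List.range' 1 (2 ^ cycles.length - 1)).foldl (pvDpStep (pvNbrB cycles))
    ([(true, 0)], PySem.Dict.empty.insert 0 1)).2.items

-- ===== PRECONDITION & SPEC =====
def Spec_independence_number_and_poly (cycles : List (List Int)) (out : List (Int × Int)) : Prop := out = independence_number_and_poly_alt cycles
instance (cycles : List (List Int)) (out : List (Int × Int)) : Decidable (Spec_independence_number_and_poly cycles out) := by unfold Spec_independence_number_and_poly; infer_instance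

-- ===== CLAIM (what is proved, stated in full; the proofs are below) =====
def Claim_equal_independence_number_and_poly : Prop := ∀ (cycles : List (List Int)), Dom_independence_number_and_poly cycles → Spec_independence_number_and_poly cycles (independence_number_and_poly cycles)

-- ===== LEMMAS AND PROOFS =====

-- entry p q of A's adjacency matrix
def pvEntry (adj : List (List Bool)) (p q : Nat) : Bool := (adj.getD p []).getD q false

-- what both adjacency structures encode: distinct in-range vertices whose cycles share an element
def pvAdjSpec (cycles : List (List Int)) (p q : Nat) : Bool :=
  decide (p < cycles.length) && decide (q < cycles.length) && decide (p ≠ q) && pvConflictA cycles p q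

-- the set-bit positions below m of a mask
def pvBits (m t : Nat) : List Nat := (List.range m).filter (fun i => t.testBit i)

-- A's per-mask independence value and vertex count
def pvGl (cycles : List (List Int)) (t : Nat) : Bool :=
  pvIndepChk (pvAdjA cycles) (pvBits cycles.length t)

def pvPc (cycles : List (List Int)) (t : Nat) : Nat := (pvBits cycles.length t).length

-- A's loop body, with the mask-derived values named
def pvAStep (cycles : List (List Int)) (alpha : PySem.Dict Int Int) (mask : Nat) : PySem.Dict Int Int :=
  if pvGl cycles mask then alpha.modify ((pvPc cycles mask : Nat) : Int) 0 (· + 1) else alpha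

def pvShape (m : Nat) (M : List (List Bool)) : Prop := M.length = m ∧ ∀ r ∈ M, r.length = m

def pvPairsA (m : Nat) : List (Nat × Nat) :=
  (List.range m).flatMap (fun i => (List.range' (i+1) (m - (i+1))).map (fun j => (i, j)))

def pvPairsB (m : Nat) : List (Nat × Nat) :=
  (List.range m).flatMap (fun i => (List.range i).map (fun j => (i, j)))

lemma pvConflictA_iff (cycles : List (List Int)) (i j : Nat) :
    pvConflictA cycles i j = true ↔ ∃ x, x ∈ cycles.getD i [] ∧ x ∈ cycles.getD j [] := by
  unfold pvConflictA
  rw [Bool.not_eq_eq_eq_not, Bool.not_true, ← Bool.not_eq_true, List.isEmpty_iff]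
  constructor
  · intro h
    obtain ⟨x, hx⟩ := List.exists_mem_of_ne_nil _ h
    rw [PySem.Set.mem_inter] at hx
    exact ⟨x, by simpa [PySem.Set.mem_ofList] using hx⟩
  · rintro ⟨x, hx1, hx2⟩ h
    have hx : x ∈ PySem.Set.inter (PySem.Set.ofList (cycles.getD i [])) (PySem.Set.ofList (cycles.getD j [])) :=
      (PySem.Set.mem_inter _ _ _).2 ⟨(PySem.Set.mem_ofList _ _).2 hx1, (PySem.Set.mem_ofList _ _).2 hx2⟩
    rw [h] at hx
    exact absurd hx (List.not_mem_nil)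
lemma pvConflictA_symm (cycles : List (List Int)) (i j : Nat) :
    pvConflictA cycles i j = pvConflictA cycles j i := by
  rw [Bool.eq_iff_iff, pvConflictA_iff, pvConflictA_iff]
  exact ⟨fun ⟨x, h1, h2⟩ => ⟨x, h2, h1⟩, fun ⟨x, h1, h2⟩ => ⟨x, h2, h1⟩⟩
lemma pvTestBit_eq (mask i : Nat) : ((mask >>> i) &&& 1 == 1) = mask.testBit i := by
  unfold Nat.testBit
  rw [Nat.and_comm]
  rcases Nat.mod_two_eq_zero_or_one (mask >>> i) with h | h <;>
    simp [h]
lemma pvLowbitIndex_odd (t : Nat) (h : t % 2 = 1) : pvLowbitIndex t = 0 := by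
  rw [pvLowbitIndex]; simp [h]
lemma pvLowbitIndex_even (t : Nat) (h : t % 2 = 0) (h0 : t ≠ 0) :
    pvLowbitIndex t = pvLowbitIndex (t / 2) + 1 := by
  rw [pvLowbitIndex]; simp [h, h0]
lemma pvLowbit_spec (t : Nat) (ht : 0 < t) :
    ∃ k, t = 2 ^ pvLowbitIndex t * (2 * k + 1) := by
  induction t using Nat.strong_induction_on with
  | _ t ih =>
    by_cases h2 : t % 2 = 0
    · rw [pvLowbitIndex_even t h2 (by omega)]
      obtain ⟨k, hk⟩ := ih (t / 2) (Nat.div_lt_self ht Nat.one_lt_two) (by omega)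
      refine ⟨k, ?_⟩
      calc t = 2 * (t / 2) := by omega
        _ = 2 * (2 ^ pvLowbitIndex (t / 2) * (2 * k + 1)) := by rw [← hk]
        _ = 2 ^ (pvLowbitIndex (t / 2) + 1) * (2 * k + 1) := by rw [pow_succ]; ring
    · rw [pvLowbitIndex_odd t (by omega)]
      exact ⟨t / 2, by omega⟩
lemma pvDecomp (t : Nat) (ht : 0 < t) :
    2 ^ pvLowbitIndex t ≤ t ∧
    (∀ j, t.testBit j = (decide (j = pvLowbitIndex t) || (t - 2 ^ pvLowbitIndex t).testBit j)) ∧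
    (∀ j ≤ pvLowbitIndex t, (t - 2 ^ pvLowbitIndex t).testBit j = false) := by
  obtain ⟨k, hk⟩ := pvLowbit_spec t ht
  set i := pvLowbitIndex t with hi
  have hle : 2 ^ i ≤ t := by
    rw [hk]; exact Nat.le_mul_of_pos_right _ (by omega)
  have hrest : t - 2 ^ i = 2 ^ (i+1) * k := by
    have : 2 ^ i * (2 * k + 1) = 2 ^ (i+1) * k + 2 ^ i := by rw [pow_succ]; ring
    omega
  have htb : ∀ j, t.testBit j = if j < i then false else (2 * k + 1).testBit (j - i) := by
    intro j
    have h := Nat.testBit_two_pow_mul_add (2 * k + 1) (i := i) (b := 0) (Nat.two_pow_pos i) j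
    simpa [hk, Nat.zero_testBit] using h
  have hrb : ∀ j, (t - 2 ^ i).testBit j = if j < i + 1 then false else k.testBit (j - (i+1)) := by
    intro j
    have h := Nat.testBit_two_pow_mul_add k (i := i+1) (b := 0) (Nat.two_pow_pos (i+1)) j
    simpa [hrest, Nat.zero_testBit] using h
  have h0 : (2 * k + 1).testBit 0 = true := by
    rw [Nat.testBit_zero]
    have : (2 * k + 1) % 2 = 1 := by omega
    simp [this]
  refine ⟨hle, ?_, ?_⟩
  · intro j
    rw [htb j, hrb j]
    rcases Nat.lt_trichotomy j i with h | h | h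
    · simp [h, Nat.lt_succ_of_lt h, Nat.ne_of_lt h]
    · subst h
      simp [h0]
    · have hji : ¬ j < i := by omega
      have hji1 : ¬ j < i + 1 := by omega
      have hne : ¬ j = i := by omega
      simp only [hji, hji1, if_neg, not_false_iff, hne, decide_false, Bool.false_or]
      obtain ⟨s, hs⟩ : ∃ s, j - i = s + 1 := ⟨j - i - 1, by omega⟩
      rw [hs, Nat.testBit_succ]
      have hdiv : (2 * k + 1) / 2 = k := by omega
      rw [hdiv]
      congr 1
      omega
  · intro j hj
    rw [hrb j, if_pos (by omega)]
lemma pvRange_split (m i : Nat) (h : i ≤ m) :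
    List.range m = List.range' 0 i ++ List.range' i (m - i) := by
  have h1 := List.range'_append (s := 0) (m := i) (n := m - i) (step := 1)
  simp only [Nat.zero_add, Nat.one_mul] at h1
  have h2 : i + (m - i) = m := by omega
  rw [List.range_eq_range']
  conv_lhs => rw [← h2]
  rw [← h1]
lemma pvBits_cons (m t : Nat) (ht : 0 < t) (htm : t < 2 ^ m) :
    pvBits m t = pvLowbitIndex t :: pvBits m (t - 2 ^ pvLowbitIndex t) := by
  obtain ⟨hle, hA, hB⟩ := pvDecomp t ht
  set i := pvLowbitIndex t with hidf
  set rest := t - 2 ^ i with hrdf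
  have hti : t.testBit i = true := by rw [hA i]; simp [hB i (le_refl i)]
  have him : i < m := by
    by_contra hc
    have hmi : m ≤ i := Nat.le_of_not_lt hc
    have hpow : (2:Nat) ^ m ≤ 2 ^ i := Nat.pow_le_pow_right (by omega) hmi
    have : t < 2 ^ i := lt_of_lt_of_le htm hpow
    rw [Nat.testBit_lt_two_pow this] at hti
    exact Bool.false_ne_true hti
  have hsplit1 : List.range m = List.range' 0 i ++ List.range' i (m - i) := pvRange_split m i (by omega)
  have hsplit2 : List.range m = List.range' 0 (i+1) ++ List.range' (i+1) (m - (i+1)) :=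
    pvRange_split m (i+1) (by omega)
  have hmi2 : m - i = (m - (i+1)) + 1 := by omega
  have hr' : List.range' i (m - i) = i :: List.range' (i+1) (m - (i+1)) := by
    rw [hmi2, List.range'_succ]
  have e1 : (List.range' 0 i).filter (fun j => t.testBit j) = [] := by
    rw [List.filter_eq_nil_iff]
    intro j hj
    rw [List.mem_range'_1] at hj
    rw [hA j]
    simp [Nat.ne_of_lt (by omega : j < i), hB j (by omega)]
  have e2 : (List.range' 0 (i+1)).filter (fun j => rest.testBit j) = [] := by
    rw [List.filter_eq_nil_iff]
    intro j hj
    rw [List.mem_range'_1] at hj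
    simp [hB j (by omega)]
  have e3 : (List.range' (i+1) (m - (i+1))).filter (fun j => t.testBit j)
      = (List.range' (i+1) (m - (i+1))).filter (fun j => rest.testBit j) := by
    apply List.filter_congr
    intro j hj
    rw [List.mem_range'_1] at hj
    rw [hA j]
    simp [show ¬ j = i by omega]
  have L : pvBits m t = i :: (List.range' (i+1) (m - (i+1))).filter (fun j => t.testBit j) := by
    unfold pvBits
    rw [hsplit1, List.filter_append, hr', e1, List.filter_cons_of_pos hti]
    simp
  have R : pvBits m rest = (List.range' (i+1) (m - (i+1))).filter (fun j => rest.testBit j) := by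
    unfold pvBits
    rw [hsplit2, List.filter_append, e2]
    simp
  rw [L, R, e3]
lemma pvRow_len {m : Nat} {M : List (List Bool)} (hS : pvShape m M) {a : Nat} (ha : a < m) :
    (M.getD a []).length = m := by
  have ha' : a < M.length := by have := hS.1; omega
  rw [List.getD_eq_getElem?_getD, List.getElem?_eq_getElem ha']
  exact hS.2 _ (List.getElem_mem ha')
lemma pvGetD_set (M : List (List Bool)) (a : Nat) (r : List Bool) (p : Nat) (ha : a < M.length) :
    (M.set a r).getD p [] = if p = a then r else M.getD p [] := by
  rw [List.getD_eq_getElem?_getD, List.getElem?_set]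
  by_cases h : a = p
  · subst h; simp [ha]
  · simp [h, Ne.symm h, List.getD_eq_getElem?_getD]
lemma pvRowSet_getD (r : List Bool) (b q : Nat) (hb : b < r.length) :
    (r.set b true).getD q false = if q = b then true else r.getD q false := by
  rw [List.getD_eq_getElem?_getD, List.getElem?_set]
  by_cases h : b = q
  · subst h; simp [hb]
  · simp [h, Ne.symm h, List.getD_eq_getElem?_getD]
lemma pvAdjStep_shape {cycles : List (List Int)} {adj : List (List Bool)} {i j : Nat}
    (hS : pvShape cycles.length adj) (hi : i < cycles.length) (hj : j < cycles.length) :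
    pvShape cycles.length (pvAdjStep cycles adj i j) := by
  unfold pvAdjStep
  split
  · constructor
    · simp [hS.1]
    · intro r hr
      rcases List.mem_or_eq_of_mem_set hr with hr' | hr'
      · rcases List.mem_or_eq_of_mem_set hr' with hr'' | hr''
        · exact hS.2 _ hr''
        · subst hr''; rw [List.length_set]; exact pvRow_len hS hi
      · subst hr'
        rw [List.length_set]
        have hjM : j < adj.length := by have := hS.1; omega
        have hiM : i < adj.length := by have := hS.1; omega
        rw [pvGetD_set _ _ _ _ hiM]
        split
        · rw [List.length_set]; exact pvRow_len hS hi
        · exact pvRow_len hS hj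
  · exact hS
lemma pvAdjStep_entry (cycles : List (List Int)) (adj : List (List Bool)) (i j p q : Nat)
    (hS : pvShape cycles.length adj) (hi : i < cycles.length) (hj : j < cycles.length) (hij : i ≠ j) :
    pvEntry (pvAdjStep cycles adj i j) p q
      = (pvEntry adj p q || (pvConflictA cycles i j && decide ((p, q) = (i, j) ∨ (q, p) = (i, j)))) := by
  unfold pvAdjStep
  by_cases hc : pvConflictA cycles i j
  · simp only [hc, if_true, Bool.true_and]
    have hiM : i < adj.length := by have := hS.1; omega
    have hjM : j < adj.length := by have := hS.1; omega
    have hj1 : j < (adj.set i ((adj.getD i []).set j true)).length := by simpa using hjM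
    unfold pvEntry
    rw [pvGetD_set _ _ _ _ hj1, pvGetD_set _ _ _ _ hiM]
    rw [pvGetD_set _ _ _ _ hiM]
    by_cases hpj : p = j
    · subst hpj
      simp only [Ne.symm hij, if_neg, if_pos rfl, reduceIte]
      rw [pvRowSet_getD _ _ _ (by rw [pvRow_len hS hj]; omega)]
      by_cases hqi : q = i
      · subst hqi; simp [Prod.ext_iff, hij]
      · simp [hqi, Prod.ext_iff, Ne.symm hij]
    · by_cases hpi : p = i
      · subst hpi
        simp only [hpj, if_neg, if_pos rfl, reduceIte]
        rw [pvRowSet_getD _ _ _ (by rw [pvRow_len hS hi]; omega)]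
        by_cases hqj : q = j
        · subst hqj; simp [Prod.ext_iff, hpj]
        · simp [hqj, Prod.ext_iff, hpj, fun h => hqj]
      · simp [hpj, hpi, Prod.ext_iff]
  · simp [hc]
lemma pvAdjFold_entry (cycles : List (List Int)) (P : List (Nat × Nat)) :
    ∀ (adj : List (List Bool)), pvShape cycles.length adj →
      (∀ x ∈ P, x.1 < cycles.length ∧ x.2 < cycles.length ∧ x.1 ≠ x.2) → ∀ p q,
      pvEntry (P.foldl (fun a x => pvAdjStep cycles a x.1 x.2) adj) p q
        = (pvEntry adj p q
            || P.any (fun x => pvConflictA cycles x.1 x.2 && decide ((p, q) = x ∨ (q, p) = x))) := by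
  induction P with
  | nil => intro adj _ _ p q; simp
  | cons x P ih =>
    intro adj hS hP p q
    have hx := hP x (List.mem_cons_self)
    rw [List.foldl_cons,
        ih _ (pvAdjStep_shape hS hx.1 hx.2.1) (fun y hy => hP y (List.mem_cons_of_mem _ hy)),
        pvAdjStep_entry cycles adj x.1 x.2 p q hS hx.1 hx.2.1 hx.2.2]
    simp [Bool.or_assoc]
lemma pvMem_pairsA (m : Nat) (x : Nat × Nat) :
    x ∈ pvPairsA m ↔ x.1 < x.2 ∧ x.2 < m := by
  unfold pvPairsA
  rcases x with ⟨p, q⟩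
  simp only [List.mem_flatMap, List.mem_map, List.mem_range, List.mem_range'_1, Prod.mk.injEq]
  constructor
  · rintro ⟨i, hi, j, hj, rfl, rfl⟩
    omega
  · rintro ⟨h1, h2⟩
    exact ⟨p, by omega, q, by omega, rfl, rfl⟩
lemma pvAdjA_eq_pairs (cycles : List (List Int)) :
    pvAdjA cycles = (pvPairsA cycles.length).foldl (fun a x => pvAdjStep cycles a x.1 x.2)
      (List.replicate cycles.length (List.replicate cycles.length false)) := by
  unfold pvAdjA pvPairsA
  rw [List.flatMap_def, List.foldl_flatten, List.foldl_map]
  simp only [List.foldl_map]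
lemma pvAdjSpec_iff (cycles : List (List Int)) (p q : Nat) :
    pvAdjSpec cycles p q = true ↔
      (p < cycles.length ∧ q < cycles.length ∧ p ≠ q ∧ pvConflictA cycles p q = true) := by
  unfold pvAdjSpec
  simp only [Bool.and_eq_true, decide_eq_true_eq]
  tauto
lemma pvAdjA_entry (cycles : List (List Int)) (p q : Nat) :
    pvEntry (pvAdjA cycles) p q = pvAdjSpec cycles p q := by
  rw [pvAdjA_eq_pairs]
  have hS : pvShape cycles.length (List.replicate cycles.length (List.replicate cycles.length false)) := by
    constructor
    · simp
    · intro r hr; rw [List.eq_of_mem_replicate hr]; simp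
  rw [pvAdjFold_entry cycles _ _ hS
      (fun x hx => by rw [pvMem_pairsA] at hx; exact ⟨by omega, by omega, by omega⟩) p q]
  have hinit : pvEntry (List.replicate cycles.length (List.replicate cycles.length false)) p q = false := by
    unfold pvEntry
    simp only [List.getD_eq_getElem?_getD, List.getElem?_replicate]
    split_ifs <;> simp [List.getD_eq_getElem?_getD, List.getElem?_replicate] <;> split_ifs <;> simp
  rw [hinit, Bool.false_or]
  rw [Bool.eq_iff_iff, List.any_eq_true, pvAdjSpec_iff]
  constructor
  · rintro ⟨⟨i, j⟩, hmem, hx⟩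
    rw [pvMem_pairsA] at hmem
    simp only [Bool.and_eq_true, decide_eq_true_eq, Prod.mk.injEq] at hx
    obtain ⟨hc, hor⟩ := hx
    rcases hor with ⟨rfl, rfl⟩ | ⟨rfl, rfl⟩
    · exact ⟨by omega, by omega, by omega, hc⟩
    · refine ⟨by omega, by omega, by omega, ?_⟩
      rw [pvConflictA_symm]; exact hc
  · rintro ⟨hp, hq, hpq, hc⟩
    rcases Nat.lt_or_ge p q with hlt | hge
    · refine ⟨(p, q), ?_, ?_⟩
      · rw [pvMem_pairsA]; exact ⟨hlt, hq⟩
      · simp [hc]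
    · refine ⟨(q, p), ?_, ?_⟩
      · rw [pvMem_pairsA]; exact ⟨by omega, hp⟩
      · rw [pvConflictA_symm] at hc
        simp [hc]
lemma pvGetD_set' {α : Type} (M : List α) (a : Nat) (r d : α) (p : Nat) (ha : a < M.length) :
    (M.set a r).getD p d = if p = a then r else M.getD p d := by
  rw [List.getD_eq_getElem?_getD, List.getElem?_set]
  by_cases h : a = p
  · subst h; simp [ha]
  · simp [h, Ne.symm h, List.getD_eq_getElem?_getD]
lemma pvSets_getD (cycles : List (List Int)) (i : Nat) :
    (cycles.map PySem.Set.ofList).getD i [] = PySem.Set.ofList (cycles.getD i []) := by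
  by_cases h : i < cycles.length
  · rw [List.getD_eq_getElem?_getD, List.getElem?_map, List.getElem?_eq_getElem h]
    simp [List.getD_eq_getElem?_getD, List.getElem?_eq_getElem h]
  · rw [List.getD_eq_getElem?_getD, List.getElem?_map, List.getElem?_eq_none (by omega)]
    rw [List.getD_eq_getElem?_getD, List.getElem?_eq_none (by omega)]
    rfl
lemma pvShift_testBit (j q : Nat) : ((1 : Nat) <<< j).testBit q = decide (j = q) := by
  rw [Nat.shiftLeft_eq, one_mul, Nat.testBit_two_pow]
lemma pvNbrStep_cond (cycles : List (List Int)) (i j : Nat) :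
    (!(PySem.Set.inter ((cycles.map PySem.Set.ofList).getD i [])
        ((cycles.map PySem.Set.ofList).getD j [])).isEmpty) = pvConflictA cycles i j := by
  rw [pvSets_getD, pvSets_getD]; rfl
lemma pvNbrStep_testBit (cycles : List (List Int)) (N : List Nat) (i j p q : Nat)
    (hlen : N.length = cycles.length) (hi : i < cycles.length) (hj : j < cycles.length) (hij : i ≠ j) :
    ((pvNbrStep (cycles.map PySem.Set.ofList) N i j).getD p 0).testBit q
      = (((N.getD p 0).testBit q)
          || (pvConflictA cycles i j && decide ((p, q) = (i, j) ∨ (q, p) = (i, j)))) := by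
  unfold pvNbrStep
  rw [pvNbrStep_cond]
  by_cases hc : pvConflictA cycles i j
  · simp only [hc, if_true, Bool.true_and]
    have hiM : i < N.length := by omega
    have hjM : j < (N.set i (N.getD i 0 ||| 1 <<< j)).length := by rw [List.length_set]; omega
    rw [pvGetD_set' _ _ _ _ _ hjM, pvGetD_set' _ _ _ _ _ hiM, pvGetD_set' _ _ _ _ _ hiM]
    by_cases hpj : p = j
    · subst hpj
      simp only [Ne.symm hij, if_pos rfl, reduceIte]
      rw [Nat.testBit_or, pvShift_testBit]
      by_cases hqi : q = i
      · subst hqi; simp [Prod.ext_iff, hij]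
      · have hiq : ¬ i = q := fun h => hqi h.symm
        simp [hqi, hiq, Prod.ext_iff, Ne.symm hij]
    · by_cases hpi : p = i
      · subst hpi
        simp only [hpj, if_pos rfl, reduceIte]
        rw [Nat.testBit_or, pvShift_testBit]
        by_cases hqj : q = j
        · subst hqj; simp [Prod.ext_iff, hpj]
        · have hjq : ¬ j = q := fun h => hqj h.symm
          simp [hqj, hjq, Prod.ext_iff, hpj]
      · simp [hpj, hpi, Prod.ext_iff]
  · simp [hc]
lemma pvNbrStep_len (cycles : List (List Int)) (N : List Nat) (i j : Nat) :
    (pvNbrStep (cycles.map PySem.Set.ofList) N i j).length = N.length := by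
  unfold pvNbrStep
  split <;> simp
lemma pvNbrFold_entry (cycles : List (List Int)) (P : List (Nat × Nat)) :
    ∀ (N : List Nat), N.length = cycles.length →
      (∀ x ∈ P, x.1 < cycles.length ∧ x.2 < cycles.length ∧ x.1 ≠ x.2) → ∀ p q,
      (((P.foldl (fun a x => pvNbrStep (cycles.map PySem.Set.ofList) a x.1 x.2) N).getD p 0).testBit q)
        = (((N.getD p 0).testBit q)
            || P.any (fun x => pvConflictA cycles x.1 x.2 && decide ((p, q) = x ∨ (q, p) = x))) := by
  induction P with
  | nil => intro N _ _ p q; simp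
  | cons x P ih =>
    intro N hlen hP p q
    have hx := hP x (List.mem_cons_self)
    rw [List.foldl_cons,
        ih _ (by rw [pvNbrStep_len]; exact hlen) (fun y hy => hP y (List.mem_cons_of_mem _ hy)),
        pvNbrStep_testBit cycles N x.1 x.2 p q hlen hx.1 hx.2.1 hx.2.2]
    simp [Bool.or_assoc]
lemma pvMem_pairsB (m : Nat) (x : Nat × Nat) :
    x ∈ pvPairsB m ↔ x.2 < x.1 ∧ x.1 < m := by
  unfold pvPairsB
  rcases x with ⟨p, q⟩
  simp only [List.mem_flatMap, List.mem_map, List.mem_range, Prod.mk.injEq]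
  constructor
  · rintro ⟨i, hi, j, hj, rfl, rfl⟩
    omega
  · rintro ⟨h1, h2⟩
    exact ⟨p, by omega, q, by omega, rfl, rfl⟩
lemma pvNbrB_eq_pairs (cycles : List (List Int)) :
    pvNbrB cycles = (pvPairsB cycles.length).foldl
      (fun a x => pvNbrStep (cycles.map PySem.Set.ofList) a x.1 x.2)
      (List.replicate cycles.length 0) := by
  unfold pvNbrB pvPairsB
  rw [List.flatMap_def, List.foldl_flatten, List.foldl_map]
  simp only [List.foldl_map]
lemma pvNbrB_testBit (cycles : List (List Int)) (p q : Nat) :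
    ((pvNbrB cycles).getD p 0).testBit q = pvAdjSpec cycles p q := by
  rw [pvNbrB_eq_pairs]
  rw [pvNbrFold_entry cycles _ _ (by simp)
      (fun x hx => by rw [pvMem_pairsB] at hx; exact ⟨by omega, by omega, by omega⟩) p q]
  have hinit : ((List.replicate cycles.length (0:Nat)).getD p 0).testBit q = false := by
    have : (List.replicate cycles.length (0:Nat)).getD p 0 = 0 := by
      rw [List.getD_eq_getElem?_getD, List.getElem?_replicate]
      split <;> simp
    rw [this, Nat.zero_testBit]
  rw [hinit, Bool.false_or]
  rw [Bool.eq_iff_iff, List.any_eq_true, pvAdjSpec_iff]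
  constructor
  · rintro ⟨⟨i, j⟩, hmem, hx⟩
    rw [pvMem_pairsB] at hmem
    simp only [Bool.and_eq_true, decide_eq_true_eq, Prod.mk.injEq] at hx
    obtain ⟨hc, hor⟩ := hx
    rcases hor with ⟨rfl, rfl⟩ | ⟨rfl, rfl⟩
    · exact ⟨by omega, by omega, by omega, hc⟩
    · refine ⟨by omega, by omega, by omega, ?_⟩
      rw [pvConflictA_symm]; exact hc
  · rintro ⟨hp, hq, hpq, hc⟩
    rcases Nat.lt_or_ge q p with hlt | hge
    · refine ⟨(p, q), ?_, ?_⟩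
      · rw [pvMem_pairsB]; exact ⟨hlt, hp⟩
      · simp [hc]
    · refine ⟨(q, p), ?_, ?_⟩
      · rw [pvMem_pairsB]; exact ⟨by omega, hq⟩
      · rw [pvConflictA_symm] at hc
        simp [hc]

lemma pvCheck_eq (cycles : List (List Int)) (i rest : Nat) (hr : rest < 2 ^ cycles.length) :
    (rest &&& (pvNbrB cycles).getD i 0 == 0)
      = (pvBits cycles.length rest).all (fun w => !pvEntry (pvAdjA cycles) i w) := by
  rw [Bool.eq_iff_iff, beq_iff_eq, List.all_eq_true]
  constructor
  · intro h w hw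
    unfold pvBits at hw
    rw [List.mem_filter, List.mem_range] at hw
    rw [Bool.not_eq_eq_eq_not, Bool.not_true, pvAdjA_entry]
    by_contra hc
    have hspec : pvAdjSpec cycles i w = true := by
      cases hx : pvAdjSpec cycles i w
      · exact absurd hx hc
      · rfl
    have hN : ((pvNbrB cycles).getD i 0).testBit w = true := by rw [pvNbrB_testBit]; exact hspec
    have := congrArg (fun x => x.testBit w) h
    simp only [Nat.testBit_and, Nat.zero_testBit, hw.2, hN, Bool.true_and] at this
    exact absurd this (by decide)
  · intro h
    apply Nat.eq_of_testBit_eq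
    intro j
    rw [Nat.testBit_and, Nat.zero_testBit]
    by_cases hj : rest.testBit j = true
    · have hjm : j < cycles.length := by
        by_contra hc
        have : rest < 2 ^ j :=
          lt_of_lt_of_le hr (Nat.pow_le_pow_right (by omega) (by omega))
        rw [Nat.testBit_lt_two_pow this] at hj
        exact Bool.false_ne_true hj
      have hw : j ∈ pvBits cycles.length rest := by
        unfold pvBits
        rw [List.mem_filter, List.mem_range]
        exact ⟨hjm, hj⟩
      have := h j hw
      rw [Bool.not_eq_eq_eq_not, Bool.not_true, pvAdjA_entry] at this
      rw [pvNbrB_testBit, this]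
      simp
    · simp only [Bool.not_eq_true] at hj
      rw [hj]
      simp

lemma pvBits_zero (m : Nat) : pvBits m 0 = [] := by
  unfold pvBits
  rw [List.filter_eq_nil_iff]
  intro j _
  simp [Nat.zero_testBit]

lemma pvDp_inv (cycles : List (List Int)) (n : Nat) (hn : n + 1 ≤ 2 ^ cycles.length) :
    (List.range' 1 n).foldl (pvDpStep (pvNbrB cycles)) ([(true, 0)], PySem.Dict.empty.insert 0 1)
    = ((List.range (n+1)).map (fun t => (pvGl cycles t, pvPc cycles t)),
       (List.range (n+1)).foldl (pvAStep cycles) PySem.Dict.empty) := by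
  induction n with
  | zero =>
    have hgl : pvGl cycles 0 = true := by unfold pvGl; rw [pvBits_zero]; rfl
    have hpc : pvPc cycles 0 = 0 := by unfold pvPc; rw [pvBits_zero]; rfl
    simp only [List.range'_zero, List.foldl_nil, Nat.zero_add, List.range_one, List.map_cons,
      List.map_nil, List.foldl_cons, List.foldl_nil, hgl, hpc]
    refine Prod.ext ?_ ?_
    · rfl
    · show PySem.Dict.empty.insert 0 1 = pvAStep cycles PySem.Dict.empty 0
      unfold pvAStep
      rw [hgl, if_pos rfl, hpc]
      rfl
  | succ n ih =>
    have hrange : List.range' 1 (n+1) = List.range' 1 n ++ [n+1] := by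
      have h := List.range'_append (s := 1) (m := n) (n := 1) (step := 1)
      rw [List.range'_one] at h
      have e : 1 + 1 * n = n + 1 := by omega
      rw [e] at h
      exact h.symm
    have hn' : n + 1 ≤ 2 ^ cycles.length := by omega
    rw [hrange, List.foldl_append, ih hn', List.foldl_cons, List.foldl_nil]
    set m := cycles.length with hm
    have ht0 : 0 < n + 1 := by omega
    have htm : n + 1 < 2 ^ m := by omega
    obtain ⟨hle, _, _⟩ := pvDecomp (n+1) ht0
    set i := pvLowbitIndex (n+1) with hidf
    have hshift : (1 : Nat) <<< i = 2 ^ i := by rw [Nat.shiftLeft_eq, one_mul]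
    set rest := (n+1) - 2 ^ i with hrdf
    have h2i : 0 < 2 ^ i := Nat.two_pow_pos i
    have hrlt : rest < n + 1 := by omega
    have hrlt2 : rest < 2 ^ m := by omega
    have hbits : pvBits m (n+1) = i :: pvBits m rest := pvBits_cons m (n+1) ht0 htm
    have hinfo : ((List.range (n+1)).map (fun t => (pvGl cycles t, pvPc cycles t))).getD rest (true, 0)
        = (pvGl cycles rest, pvPc cycles rest) := by
      rw [List.getD_eq_getElem?_getD, List.getElem?_map, List.getElem?_range hrlt]
      rfl
    have hgl : pvGl cycles (n+1)
        = ((pvBits m rest).all (fun w => !pvEntry (pvAdjA cycles) i w) && pvGl cycles rest) := by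
      unfold pvGl
      rw [hbits]
      rfl
    have hok : (pvGl cycles rest && (rest &&& (pvNbrB cycles).getD i 0 == 0)) = pvGl cycles (n+1) := by
      rw [pvCheck_eq cycles i rest hrlt2, hgl, Bool.and_comm]
    have hpc : pvPc cycles (n+1) = pvPc cycles rest + 1 := by
      unfold pvPc
      rw [hbits]
      rfl
    unfold pvDpStep
    simp only [← hidf, hshift, ← hrdf, hinfo]
    refine Prod.ext ?_ ?_
    · conv_rhs => rw [List.range_succ]
      rw [List.map_append, hok, ← hpc]
      rfl
    · conv_rhs => rw [List.range_succ]
      rw [List.foldl_append, List.foldl_cons, List.foldl_nil, hok, ← hpc]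
      by_cases hg : pvGl cycles (n+1) = true
      · show _ = pvAStep cycles _ (n+1)
        unfold pvAStep
        rw [if_pos hg, if_pos hg]
        rfl
      · show _ = pvAStep cycles _ (n+1)
        unfold pvAStep
        rw [if_neg hg, if_neg hg]

lemma pvA_eq (cycles : List (List Int)) :
    independence_number_and_poly cycles
      = ((List.range (2 ^ cycles.length)).foldl (pvAStep cycles) PySem.Dict.empty).items := by
  unfold independence_number_and_poly
  congr 1
  have hf : (fun (alpha : PySem.Dict Int Int) (mask : Nat) =>
      let verts := (List.range cycles.length).filter (fun i => (mask >>> i) &&& 1 == 1)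
      if pvIndepChk (pvAdjA cycles) verts then alpha.modify ((verts.length : Nat) : Int) 0 (· + 1) else alpha)
      = pvAStep cycles := by
    funext alpha mask
    have hv : (List.range cycles.length).filter (fun i => (mask >>> i) &&& 1 == 1)
        = pvBits cycles.length mask :=
      List.filter_congr (fun x _ => pvTestBit_eq mask x)
    simp only [hv, pvAStep, pvGl, pvPc]
  rw [hf]

lemma pvB_eq (cycles : List (List Int)) :
    independence_number_and_poly_alt cycles
      = ((List.range' 1 (2 ^ cycles.length - 1)).foldl (pvDpStep (pvNbrB cycles))
          ([(true, 0)], PySem.Dict.empty.insert 0 1)).2.items := rfl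

-- ===== VERDICT (by name: the statement is the Claim_ definition above) =====
theorem independence_number_and_poly_spec : Claim_equal_independence_number_and_poly := by
  intro cycles _
  unfold Spec_independence_number_and_poly
  have h1 : (1 : Nat) ≤ 2 ^ cycles.length := Nat.one_le_two_pow
  rw [pvA_eq, pvB_eq, pvDp_inv cycles (2 ^ cycles.length - 1) (by omega)]
  have h2 : 2 ^ cycles.length - 1 + 1 = 2 ^ cycles.length := by omega
  rw [h2]
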